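-- pv_equiv track=rewrite | github.com/edt-yxz-zzd/python3_src | nn_ns/RMQ/suffix_array/uint_array2suffix_array__ver5.py | make_ichar2depth
-- ===== SOURCE A (Python) =====
-- def make_ichar2depth(string):
--     assert string
--     L = len(string)
--     ichar2depth = [0]*L
--     prev_depth = 0 # ichar2depth[-1] == 0
--     for i in reversed(range(L-1)):
--         curr_char = string[i]
--         succ_char = string[i+1]
--         if curr_char == succ_char:
--             depth = prev_depth+1
--         else:
--             depth = 0
--         prev_depth = ichar2depth[i] = depth
--     return ichar2depth
-- ===== SOURCE B (Python) =====
-- def make_ichar2depth(string):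
--     # run-by-run forward fill: each maximal run of length m contributes m-1, m-2, ..., 0
--     assert string
--     L = len(string)
--     out = []
--     i = 0
--     while i < L:
--         j = i + 1
--         while j < L and string[j] == string[i]:
--             j += 1
--         out.extend(range(j - i - 1, -1, -1))
--         i = j
--     return out
-- ===== Notes on version B (the rewrite author's own statement) =====
-- stated objective: alternative
-- what changed: Replaces A's backward pass that carries a running depth right-to-left with a forward run-by-run scan: each maximal run of m equal characters is found with an inner scan and the countdown m-1, ..., 0 is appended for it.
import Mathlib
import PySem

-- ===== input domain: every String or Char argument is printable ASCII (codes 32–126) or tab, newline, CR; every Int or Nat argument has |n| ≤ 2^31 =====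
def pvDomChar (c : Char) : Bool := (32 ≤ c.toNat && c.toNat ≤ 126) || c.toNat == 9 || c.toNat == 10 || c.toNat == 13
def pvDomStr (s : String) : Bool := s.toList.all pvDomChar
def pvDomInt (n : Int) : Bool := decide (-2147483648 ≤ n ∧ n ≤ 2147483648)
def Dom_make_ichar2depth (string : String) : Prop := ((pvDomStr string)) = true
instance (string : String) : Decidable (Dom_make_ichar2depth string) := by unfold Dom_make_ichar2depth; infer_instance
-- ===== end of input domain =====

-- B replaces A's backward depth-carrying loop by a forward run-by-run fill (each maximal
-- run of length m contributes the countdown m-1, …, 0); objective: alternative decomposition.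

-- ===== PORT A =====
-- body of A's backward for-loop; state = (prev_depth, ichar2depth)
def aStep (s : List Char) (st : Int × List Int) (i : Nat) : Int × List Int :=
  let curr_char := s.getD i ' '        -- string[i]; i stays in range throughout the loop, so getD is exact
  let succ_char := s.getD (i + 1) ' '  -- string[i+1]
  let depth : Int := if curr_char == succ_char then st.1 + 1 else 0
  (depth, st.2.set i depth)

def make_ichar2depth (string : String) : List Int :=
  -- assert string  → Pre_make_ichar2depth
  -- ichar2depth = [0]*L; prev_depth = 0; for i in reversed(range(L-1)): …
  ((List.range (string.toList.length - 1)).reverse.foldl (aStep string.toList)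
    (0, List.replicate string.toList.length 0)).2

-- ===== PORT B =====
-- range(j - i - 1, -1, -1): the descending countdown appended for one run of length m
def altCountdown (m : Nat) : List Int := PySem.List.pyRange ((m : Int) - 1) (-1) (-1)

-- outer while loop of B: consume one maximal run per step (inner while = takeWhile)
def altRuns : List Char → List Int
  | [] => []
  | c :: rest =>
    let k := (rest.takeWhile (fun x => x == c)).length
    altCountdown (k + 1) ++ altRuns (rest.drop k)
termination_by l => l.length
decreasing_by simp

def make_ichar2depth_alt (string : String) : List Int :=
  -- assert string  → Pre_make_ichar2depth
  altRuns string.toList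

-- ===== PRECONDITION & SPEC =====
-- Pre_ excludes only the empty string, on which A's `assert string` raises AssertionError.
def Pre_make_ichar2depth (string : String) : Prop := string ≠ ""
instance (string : String) : Decidable (Pre_make_ichar2depth string) := by unfold Pre_make_ichar2depth; infer_instance
def pvWitness_make_ichar2depth : String := "aab"

def Spec_make_ichar2depth (string : String) (out : List Int) : Prop := out = make_ichar2depth_alt string
instance (string : String) (out : List Int) : Decidable (Spec_make_ichar2depth string out) := by unfold Spec_make_ichar2depth; infer_instance

-- ===== CLAIM (what is proved, stated in full; the proofs are below) =====
def Claim_equal_make_ichar2depth : Prop := ∀ (string : String), Dom_make_ichar2depth string → Pre_make_ichar2depth string → Spec_make_ichar2depth string (make_ichar2depth string)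

-- ===== LEMMAS AND PROOFS =====

-- reference function: right-to-left depths, d[i] = d[i+1]+1 if s[i]=s[i+1] else 0, d[last] = 0
def rdepth : List Char → List Int
  | [] => []
  | [_] => [0]
  | a :: b :: t => (if a == b then (rdepth (b :: t)).headI + 1 else 0) :: rdepth (b :: t)

-- the countdown m-1, …, 0
def cd : Nat → List Int
  | 0 => []
  | m + 1 => (m : Int) :: cd m

lemma rdepth_length : ∀ s : List Char, (rdepth s).length = s.length := by
  intro s
  induction s using rdepth.induct <;> simp [rdepth, *]

lemma map_range_desc : ∀ m : Nat, (List.range m).map (fun k : Nat => (m : Int) - 1 - (k : Int)) = cd m := by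
  intro m
  induction m with
  | zero => simp [cd]
  | succ m ih =>
    rw [List.range_succ_eq_map, List.map_cons, List.map_map]
    refine List.cons_eq_cons.mpr ⟨by push_cast; ring, ?_⟩
    rw [← ih]
    refine List.map_congr_left fun k _ => ?_
    simp only [Function.comp]
    push_cast
    ring

lemma altCountdown_eq_cd (m : Nat) : altCountdown m = cd m := by
  cases m with
  | zero => rfl
  | succ m =>
    unfold altCountdown PySem.List.pyRange
    rw [if_neg (by norm_num)]
    simp only
    rw [if_neg (by norm_num), if_pos (by push_cast; omega)]
    have hc : ((((m+1:Nat):Int) - 1 - -1 + - -1 - 1) / - -1).toNat = m + 1 := by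
      push_cast; norm_num
    rw [hc, ← map_range_desc (m+1)]
    refine List.map_congr_left fun k _ => ?_
    push_cast
    ring

lemma rdepth_run : ∀ (k : Nat) (c : Char) (t : List Char),
    (∀ d, t.head? = some d → d ≠ c) →
    rdepth (List.replicate (k + 1) c ++ t) = cd (k + 1) ++ rdepth t := by
  intro k
  induction k with
  | zero =>
    intro c t h
    cases t with
    | nil => simp [rdepth, cd]
    | cons d t' =>
      have hdc : (c == d) = false := by
        have := h d rfl
        simp only [beq_eq_false_iff_ne, ne_eq]
        exact fun hh => this hh.symm
      simp [rdepth, cd, hdc]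
  | succ k ih =>
    intro c t h
    have hrep : List.replicate (k + 2) c ++ t = c :: c :: (List.replicate k c ++ t) := by
      simp [List.replicate_succ]
    have hrep1 : c :: (List.replicate k c ++ t) = List.replicate (k + 1) c ++ t := by
      simp [List.replicate_succ]
    rw [hrep, rdepth, hrep1, ih c t h]
    simp [cd]

lemma altRuns_eq_rdepth : ∀ s : List Char, altRuns s = rdepth s := by
  intro s
  induction s using altRuns.induct with
  | case1 => simp [altRuns, rdepth]
  | case2 c rest kk ih =>
    rw [altRuns]
    set k := (rest.takeWhile (fun x => x == c)).length with hk
    have htake : rest.takeWhile (fun x => x == c) = List.replicate k c := by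
      have : ∀ b ∈ rest.takeWhile (fun x => x == c), b = c := by
        intro b hb
        have := List.mem_takeWhile_imp hb
        simpa [beq_iff_eq] using this
      simpa [← hk] using List.eq_replicate_of_mem this
    have hdrop : rest.drop k = rest.dropWhile (fun x => x == c) := by
      have h := List.takeWhile_append_dropWhile (p := fun x => x == c) (l := rest)
      conv_lhs => rw [← h]
      exact List.drop_left' hk.symm
    have hsplit : c :: rest = List.replicate (k + 1) c ++ rest.drop k := by
      rw [hdrop]
      conv_lhs => rw [show rest = rest.takeWhile (fun x => x == c) ++ rest.dropWhile (fun x => x == c) from (List.takeWhile_append_dropWhile).symm]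
      rw [htake]
      simp [List.replicate_succ]
    have hhead : ∀ d, (rest.drop k).head? = some d → d ≠ c := by
      intro d hd
      rw [hdrop] at hd
      have := List.head?_dropWhile_not (fun x => x == c) rest
      rw [hd] at this
      simpa [beq_iff_eq] using this
    rw [altCountdown_eq_cd, ih, ← rdepth_run k c (rest.drop k) hhead, ← hsplit]

lemma rdepth_last : ∀ s : List Char, s ≠ [] → (rdepth s).drop (s.length - 1) = [0] := by
  intro s
  induction s using rdepth.induct with
  | case1 => intro h; simp at h
  | case2 c => intro _; simp [rdepth]
  | case3 a b t ih =>
    intro _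
    rw [rdepth]
    have hlen : (a :: b :: t).length - 1 = ((b :: t).length - 1) + 1 := by simp
    rw [hlen, List.drop_succ_cons]
    exact ih (by simp)

lemma headI_eq_getD (l : List Int) (h : l ≠ []) : l.headI = l.getD 0 0 := by
  cases l with
  | nil => exact absurd rfl h
  | cons x xs => simp

lemma rdepth_getD : ∀ (s : List Char) (k : Nat), k + 1 < s.length →
    (rdepth s).getD k 0 =
      (if s.getD k ' ' == s.getD (k + 1) ' ' then (rdepth s).getD (k + 1) 0 + 1 else 0) := by
  intro s
  induction s using rdepth.induct with
  | case1 => intro k h; simp at h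
  | case2 c => intro k h; simp at h
  | case3 a b t ih =>
    intro k h
    cases k with
    | zero =>
      have hne : rdepth (b :: t) ≠ [] := by
        have hl := rdepth_length (b :: t)
        intro hc; rw [hc] at hl; simp at hl
      rw [rdepth]
      simp only [List.getD_cons_zero, List.getD_cons_succ]
      rw [headI_eq_getD _ hne]
    | succ k =>
      rw [rdepth]
      simp only [List.getD_cons_succ]
      exact ih k (by simpa using h)

lemma aLoop (s : List Char) : ∀ k : Nat, k + 1 ≤ s.length →
    (List.range k).reverse.foldl (aStep s)
        ((rdepth s).getD k 0, List.replicate k 0 ++ (rdepth s).drop k)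
      = ((rdepth s).getD 0 0, rdepth s) := by
  intro k
  induction k with
  | zero => intro _; simp
  | succ k ih =>
    intro h
    have hdlen : (rdepth s).length = s.length := rdepth_length s
    rw [List.range_succ, List.reverse_append]
    simp only [List.reverse_singleton, List.singleton_append, List.foldl_cons]
    have hstep : aStep s ((rdepth s).getD (k + 1) 0, List.replicate (k + 1) 0 ++ (rdepth s).drop (k + 1)) k
        = ((rdepth s).getD k 0, List.replicate k 0 ++ (rdepth s).drop k) := by
      unfold aStep
      have hd : (if s.getD k ' ' == s.getD (k + 1) ' ' then (rdepth s).getD (k + 1) 0 + 1 else 0)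
          = (rdepth s).getD k 0 := (rdepth_getD s k (by omega)).symm
      simp only [hd]
      congr 1
      have hkd : k < (rdepth s).length := by omega
      have hdropk : (rdepth s).drop k = (rdepth s).getD k 0 :: (rdepth s).drop (k + 1) := by
        rw [List.drop_eq_getElem_cons hkd, List.getD_eq_getElem _ _ hkd]
      have hrep : List.replicate (k + 1) (0 : Int) = List.replicate k 0 ++ [0] := by
        simp [List.replicate_succ']
      rw [hrep, List.append_assoc, List.set_append]
      simp only [List.length_replicate]
      rw [if_neg (by omega)]
      simp only [Nat.sub_self]
      rw [hdropk]
      simp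
    rw [hstep]
    exact ih (by omega)

-- ===== VERDICT (by name: the statement is the Claim_ definition above) =====
theorem make_ichar2depth_spec : Claim_equal_make_ichar2depth := by
  intro string _ hpre
  unfold Spec_make_ichar2depth make_ichar2depth make_ichar2depth_alt
  rw [altRuns_eq_rdepth]
  have hsne : string.toList ≠ [] := by
    intro hc
    exact hpre (by rwa [← String.toList_eq_nil_iff])
  have hL : 0 < string.toList.length := List.length_pos_iff.mpr hsne
  have hdlen := rdepth_length string.toList
  have hlast := rdepth_last string.toList hsne
  have hget : (rdepth string.toList).getD (string.toList.length - 1) 0 = 0 := by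
    have h0 : ((rdepth string.toList).drop (string.toList.length - 1))[(0:Nat)]?
        = (rdepth string.toList)[string.toList.length - 1 + 0]? := List.getElem?_drop
    rw [hlast] at h0
    rw [List.getD_eq_getElem?_getD,
      show string.toList.length - 1 = string.toList.length - 1 + 0 from rfl, ← h0]
    rfl
  have hinit : ((0 : Int), List.replicate string.toList.length (0 : Int))
      = ((rdepth string.toList).getD (string.toList.length - 1) 0,
         List.replicate (string.toList.length - 1) 0 ++ (rdepth string.toList).drop (string.toList.length - 1)) := by
    rw [hget, hlast, ← List.replicate_succ']
    congr 2
    omega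
  rw [hinit]
  have hfold := aLoop string.toList (string.toList.length - 1) (by omega)
  rw [hfold]
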